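-- pv_equiv track=rewrite | github.com/Sett03/Exc-Ui-Graphique | SuperParfait/Sparfait.py | Sparfait
-- ===== SOURCE A (Python) =====
-- def parfait(N):
--     S=0
--     for i in range ( 1, N-1,1):
--         if N%i==0:
--             S=S+i
--     if S==N:
--         return True
--     else:
--         return False
--
-- def Sparfait(X):
--     if parfait(X)==False:
--         return False
--     else :
--         ch=str(X)
--         i=0
--         valid = False
--         while valid == False and i<len(ch) :
--             if not parfait(int(ch[i]))==True:
--                 i=i+1
--             else :
--                 valid= True
--         return valid
-- ===== SOURCE B (Python) =====
-- def _sigma(n):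
--     # sum of all positive divisors of n, by pairing i with n // i up to sqrt(n)
--     s = 0
--     i = 1
--     while i * i <= n:
--         if n % i == 0:
--             s += i
--             q = n // i
--             if q != i:
--                 s += q
--         i += 1
--     return s
--
-- def _perfect(n):
--     return _sigma(n) == 2 * n
--
-- def Sparfait(X):
--     if not _perfect(X):
--         return False
--     return any(_perfect(int(c)) for c in str(X))
-- ===== Notes on version B (the rewrite author's own statement) =====
-- stated objective: faster
-- what changed: B tests perfection as sigma(n)==2n with the divisor sum computed by pairing i with n//i up to sqrt(n), instead of A's linear scan of range(1, N-1), and scans the digits with any() instead of A's index while-loop.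
import Mathlib
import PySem

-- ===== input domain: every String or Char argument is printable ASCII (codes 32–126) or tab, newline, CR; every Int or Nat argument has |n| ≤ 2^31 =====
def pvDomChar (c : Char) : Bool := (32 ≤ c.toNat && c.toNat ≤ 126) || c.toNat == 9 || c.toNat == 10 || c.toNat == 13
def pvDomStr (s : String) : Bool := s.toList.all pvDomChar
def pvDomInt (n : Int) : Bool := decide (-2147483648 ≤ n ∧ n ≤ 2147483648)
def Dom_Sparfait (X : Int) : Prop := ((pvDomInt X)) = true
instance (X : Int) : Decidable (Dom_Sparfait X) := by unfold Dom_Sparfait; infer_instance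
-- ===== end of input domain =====

-- B tests perfection as "sum of all divisors (paired up to sqrt) == 2n" instead of A's
-- linear divisor scan over range(1, N-1); same return values on every input.


-- ===== PORT A =====
-- parfait(N): S = sum of i in range(1, N-1) with N % i == 0; return True iff S == N
def parfaitA (N : Int) : Bool :=
  let S := (PySem.List.pyRange 1 (N - 1) 1).foldl
    (fun S i => if PySem.Int.mod N i == 0 then S + i else S) 0
  if S = N then true else false

-- the while loop of Sparfait: scan ch from index i until a digit d with parfait(d)
-- (int(ch[i]) always parses here: the loop is only reached when parfait(X) holds, hence X ≥ 0)
def digitLoopA (ch : List Char) (i : Int) : Bool :=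
  if h : i < (ch.length : Int) then
    if !(parfaitA ((PySem.Int.ofChars? [(PySem.List.pyGet? ch i).getD '0']).getD 0)) then
      digitLoopA ch (i + 1)
    else true
  else false
termination_by ((ch.length : Int) - i).toNat
decreasing_by omega

def Sparfait (X : Int) : Bool :=
  if parfaitA X == false then false
  else digitLoopA (PySem.Int.toChars X) 0

-- ===== PORT B =====
-- _sigma(n): while i*i <= n, add divisor i and its cofactor n // i (once if equal)
def sigmaLoop (n : Int) (i : Int) (s : Int) : Int :=
  if h : i * i ≤ n then
    let s := if PySem.Int.mod n i == 0 then
        let s := s + i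
        let q := PySem.Int.floordiv n i
        if q != i then s + q else s
      else s
    sigmaLoop n (i + 1) s
  else s
termination_by (n + 1 - i).toNat
decreasing_by
  have hin : i ≤ n := by nlinarith [mul_self_nonneg i]
  omega

def sigmaB (n : Int) : Int := sigmaLoop n 1 0

def perfectB (n : Int) : Bool := sigmaB n == 2 * n

def Sparfait_alt (X : Int) : Bool :=
  if !(perfectB X) then false
  else (PySem.Int.toChars X).any (fun c =>
    perfectB ((PySem.Int.ofChars? [c]).getD 0))

-- ===== PRECONDITION & SPEC =====
def Spec_Sparfait (X : Int) (out : Bool) : Prop := out = Sparfait_alt X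
instance (X : Int) (out : Bool) : Decidable (Spec_Sparfait X out) := by unfold Spec_Sparfait; infer_instance

-- ===== CLAIM (what is proved, stated in full; the proofs are below) =====
def Claim_equal_Sparfait : Prop := ∀ (X : Int), Dom_Sparfait X → Spec_Sparfait X (Sparfait X)

-- ===== LEMMAS AND PROOFS =====

-- the sum A's loop computes
def sumA (n : Int) : Int :=
  (PySem.List.pyRange 1 (n - 1) 1).foldl
    (fun S i => if PySem.Int.mod n i == 0 then S + i else S) 0

-- per-iteration contribution of B's loop
def contribB (n i : Int) : Int :=
  if PySem.Int.mod n i == 0 then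
    i + (if PySem.Int.floordiv n i ≠ i then PySem.Int.floordiv n i else 0)
  else 0

def isq (n : Int) : Int := (Nat.sqrt n.toNat : Int)

lemma isq_le_iff {n i : Int} (hn : 0 ≤ n) (hi : 1 ≤ i) : i * i ≤ n ↔ i ≤ isq n := by
  unfold isq
  obtain ⟨a, rfl⟩ : ∃ a : Nat, i = (a : Int) := ⟨i.toNat, by omega⟩
  obtain ⟨m, rfl⟩ : ∃ m : Nat, n = (m : Int) := ⟨n.toNat, by omega⟩
  rw [show ((a : Int) * (a : Int)) = ((a * a : Nat) : Int) by push_cast; ring,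
      Int.toNat_natCast, Nat.cast_le, Nat.cast_le, ← Nat.le_sqrt]

lemma sigmaLoop_eq_sum (n : Int) (hn : 0 ≤ n) :
    ∀ (k : Nat) (j s : Int), (n + 1 - j).toNat = k → 1 ≤ j →
      sigmaLoop n j s = s + ∑ i ∈ Finset.Icc j (isq n), contribB n i := by
  intro k
  induction k with
  | zero =>
    intro j s hk hj
    have hjn : n < j := by omega
    have hguard : ¬ j * j ≤ n := by nlinarith
    rw [sigmaLoop, dif_neg hguard, Finset.Icc_eq_empty, Finset.sum_empty, add_zero]
    intro hle
    exact hguard ((isq_le_iff hn hj).mpr hle)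
  | succ k ih =>
    intro j s hk hj
    rw [sigmaLoop]
    by_cases hguard : j * j ≤ n
    · rw [dif_pos hguard]
      have hjn : j ≤ n := by nlinarith
      rw [ih (j + 1) _ (by omega) (by omega)]
      have hjq : j ≤ isq n := (isq_le_iff hn hj).mp hguard
      rw [show Finset.Icc j (isq n) = insert j (Finset.Icc (j + 1) (isq n)) by
            ext x; simp only [Finset.mem_Icc, Finset.mem_insert]; omega,
          Finset.sum_insert (by simp only [Finset.mem_Icc]; omega), ← add_assoc]
      congr 1
      unfold contribB
      split_ifs <;> simp_all [bne_iff_ne] <;> try omega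
    · rw [dif_neg hguard, Finset.Icc_eq_empty, Finset.sum_empty, add_zero]
      intro hle
      exact hguard ((isq_le_iff hn hj).mpr hle)

lemma cofactor_facts {n d : Int} (hn : 1 ≤ n) (hd1 : 1 ≤ d) (hdvd : d ∣ n) :
    1 ≤ n / d ∧ (n / d) ∣ n ∧ d * (n / d) = n := by
  obtain ⟨e, he⟩ := hdvd
  have hd0 : d ≠ 0 := by omega
  have hq : n / d = e := by rw [he, Int.mul_ediv_cancel_left _ hd0]
  have he1 : 1 ≤ e := by nlinarith
  exact ⟨by omega, ⟨d, by rw [hq, he]; ring⟩, by rw [hq, he]⟩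

lemma cofactor_inv {n d : Int} (hn : 1 ≤ n) (hd1 : 1 ≤ d) (hdvd : d ∣ n) :
    n / (n / d) = d := by
  obtain ⟨e, he⟩ := hdvd
  have hd0 : d ≠ 0 := by omega
  have hq : n / d = e := by rw [he, Int.mul_ediv_cancel_left _ hd0]
  have he1 : 1 ≤ e := by nlinarith
  rw [hq, he, Int.mul_ediv_cancel _ (by omega)]

lemma sum_contrib_eq (n : Int) (hn : 1 ≤ n) :
    ∑ i ∈ Finset.Icc 1 (isq n), contribB n i
      = ∑ d ∈ (Finset.Icc 1 n).filter (fun d => d ∣ n), d := by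
  have hn0 : (0 : Int) ≤ n := by omega
  have hstep : ∀ i ∈ Finset.Icc 1 (isq n), contribB n i =
      (if i ∣ n then i else 0) +
      (if i ∣ n ∧ n / i ≠ i then n / i else 0) := by
    intro i hi
    simp only [Finset.mem_Icc] at hi
    unfold contribB
    rw [PySem.Int.floordiv_eq_ediv_of_pos (by omega : (0:Int) < i)]
    by_cases hd : i ∣ n
    · have hm : (PySem.Int.mod n i == 0) = true := by
        simp [PySem.Int.mod_eq_zero_iff_dvd, hd]
      rw [hm, if_pos rfl]
      split_ifs <;> simp_all
    · have hm : (PySem.Int.mod n i == 0) = false := by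
        simp [PySem.Int.mod_eq_zero_iff_dvd, hd]
      rw [hm]
      simp [hd]
  rw [Finset.sum_congr rfl hstep, Finset.sum_add_distrib]
  -- small divisors (d * d ≤ n), picked up as the loop counter i itself
  have hsmall : (∑ i ∈ Finset.Icc 1 (isq n), if i ∣ n then i else 0)
      = ∑ d ∈ ((Finset.Icc 1 n).filter (fun d => d ∣ n)).filter (fun d => d * d ≤ n), d := by
    rw [← Finset.sum_filter]
    apply Finset.sum_congr _ (fun _ _ => rfl)
    ext x
    simp only [Finset.mem_filter, Finset.mem_Icc]
    constructor
    · rintro ⟨⟨h1, h2⟩, h3⟩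
      have hxx : x * x ≤ n := (isq_le_iff hn0 h1).mpr h2
      exact ⟨⟨⟨h1, by nlinarith⟩, h3⟩, hxx⟩
    · rintro ⟨⟨⟨h1, _⟩, h3⟩, h2⟩
      exact ⟨⟨h1, (isq_le_iff hn0 h1).mp h2⟩, h3⟩
  -- large divisors (n < d * d), picked up as cofactors n / i
  have hbig : (∑ i ∈ Finset.Icc 1 (isq n), if i ∣ n ∧ n / i ≠ i then n / i else 0)
      = ∑ d ∈ ((Finset.Icc 1 n).filter (fun d => d ∣ n)).filter (fun d => ¬ d * d ≤ n), d := by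
    rw [← Finset.sum_filter]
    refine Finset.sum_nbij' (fun a => n / a) (fun d => n / d) ?_ ?_ ?_ ?_ ?_
    · intro a ha
      simp only [Finset.mem_filter, Finset.mem_Icc] at ha
      obtain ⟨⟨ha1, ha2⟩, hdvd, hne⟩ := ha
      obtain ⟨hq1, hqdvd, hqmul⟩ := cofactor_facts hn ha1 hdvd
      have haa : a * a ≤ n := (isq_le_iff hn0 ha1).mpr ha2
      have hle' : a ≤ n / a := by nlinarith
      have hlt : a < n / a := by omega
      simp only [Finset.mem_filter, Finset.mem_Icc]
      exact ⟨⟨⟨hq1, by nlinarith⟩, hqdvd⟩, by nlinarith⟩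
    · intro d hd
      simp only [Finset.mem_filter, Finset.mem_Icc] at hd
      obtain ⟨⟨⟨hd1, hd2⟩, hdvd⟩, hbig⟩ := hd
      obtain ⟨hq1, hqdvd, hqmul⟩ := cofactor_facts hn hd1 hdvd
      have hlt : n / d < d := by nlinarith
      have hback : n / (n / d) = d := cofactor_inv hn hd1 hdvd
      simp only [Finset.mem_filter, Finset.mem_Icc]
      refine ⟨⟨hq1, (isq_le_iff hn0 hq1).mp (by nlinarith)⟩, hqdvd, ?_⟩
      rw [hback]; omega
    · intro a ha
      simp only [Finset.mem_filter, Finset.mem_Icc] at ha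
      exact cofactor_inv hn ha.1.1 ha.2.1
    · intro d hd
      simp only [Finset.mem_filter, Finset.mem_Icc] at hd
      exact cofactor_inv hn hd.1.1.1 hd.1.2
    · intro a _; rfl
  rw [hsmall, hbig, Finset.sum_filter_add_sum_filter_not]

lemma sumA_eq_finset (n : Int) :
    sumA n = ∑ d ∈ (Finset.Icc 1 (n - 2)).filter (fun d => d ∣ n), d := by
  unfold sumA
  rw [PySem.List.foldl_if_eq_foldl_filter (p := fun i : Int => PySem.Int.mod n i == 0)
        (f := fun S i => S + i),
      List.filter_congr (fun x _ => show (PySem.Int.mod n x == 0) = decide (x ∣ n) by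
        rw [Bool.eq_iff_iff]; simp [PySem.Int.mod_eq_zero_iff_dvd]),
      PySem.List.foldl_add _ (fun i => i), zero_add]
  have hnd : ((PySem.List.pyRange 1 (n - 1) 1).filter (fun i : Int => decide (i ∣ n))).Nodup :=
    (PySem.List.nodup_pyRange_one _ _).filter _
  rw [← List.sum_toFinset (fun x : Int => x) hnd, List.toFinset_filter]
  apply Finset.sum_congr _ (fun _ _ => rfl)
  ext x
  simp only [Finset.mem_filter, List.mem_toFinset, PySem.List.mem_pyRange_one,
    Finset.mem_Icc, decide_eq_true_eq]
  constructor
  · rintro ⟨⟨h1, h2⟩, h3⟩; exact ⟨⟨h1, by omega⟩, h3⟩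
  · rintro ⟨⟨h1, h2⟩, h3⟩; exact ⟨⟨h1, by omega⟩, h3⟩

-- for n ≥ 3 the divisors of n in [1, n] are n itself plus those in [1, n-2]
lemma sigmaB_eq_sumA_add (n : Int) (hn : 3 ≤ n) : sigmaB n = sumA n + n := by
  rw [sumA_eq_finset, sigmaB,
      sigmaLoop_eq_sum n (by omega) (n + 1 - 1).toNat 1 0 rfl le_rfl, zero_add,
      sum_contrib_eq n (by omega)]
  have hsplit : (Finset.Icc 1 n).filter (fun d => d ∣ n)
      = insert n ((Finset.Icc 1 (n - 2)).filter (fun d => d ∣ n)) := by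
    ext x
    simp only [Finset.mem_filter, Finset.mem_Icc, Finset.mem_insert]
    constructor
    · rintro ⟨⟨h1, h2⟩, h3⟩
      by_cases hx : x = n
      · exact Or.inl hx
      · refine Or.inr ⟨⟨h1, ?_⟩, h3⟩
        -- x ∣ n, x < n: x ≠ n - 1 (else x ∣ 1 with x ≥ 2)
        by_contra hgt
        have hx1 : x = n - 1 := by omega
        obtain ⟨e, he⟩ := h3
        subst hx1
        have he2 : 2 ≤ e := by nlinarith
        nlinarith
    · rintro (rfl | ⟨⟨h1, h2⟩, h3⟩)
      · exact ⟨⟨by omega, le_rfl⟩, dvd_refl _⟩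
      · exact ⟨⟨h1, by omega⟩, h3⟩
  rw [hsplit, Finset.sum_insert (by simp only [Finset.mem_filter, Finset.mem_Icc]; omega)]
  ring

lemma parfaitA_eq (n : Int) : parfaitA n = perfectB n := by
  have hA : parfaitA n = (if sumA n = n then true else false) := rfl
  have hB : perfectB n = (sigmaB n == 2 * n) := rfl
  by_cases h3 : 3 ≤ n
  · rw [hA, hB, sigmaB_eq_sumA_add n h3]
    by_cases hc : sumA n = n
    · simp [hc]; omega
    · have : ¬ sumA n + n = 2 * n := by omega
      simp [hc, this]
  · -- n ≤ 2: both loops are short enough to evaluate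
    by_cases h0 : 0 < n
    · have e1 : sigmaB (1:Int) = 1 := by
        rw [sigmaB, sigmaLoop, sigmaLoop]
        norm_num [PySem.Int.mod, PySem.Int.floordiv]
      have e2 : sigmaB (2:Int) = 3 := by
        rw [sigmaB, sigmaLoop, sigmaLoop]
        norm_num [PySem.Int.mod, PySem.Int.floordiv]
      interval_cases n
      · rw [hA, hB, e1]; decide
      · rw [hA, hB, e2]; decide
    · -- n ≤ 0: A's range is empty, B's loop never runs (1 * 1 > n)
      have hsA : sumA n = 0 := by
        unfold sumA; rw [PySem.List.pyRange_one_eq_nil (by omega)]; rfl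
      have hsB : sigmaB n = 0 := by
        unfold sigmaB; rw [sigmaLoop, dif_neg (by omega)]
      rw [hA, hB, hsA, hsB]
      by_cases hn0 : n = 0
      · subst hn0; decide
      · have h1 : ¬ (0 : Int) = n := by omega
        have h2 : ¬ ((0 : Int) = 2 * n) := by omega
        simp [h1, h2]

lemma digitLoopA_eq_any (ch : List Char) :
    ∀ (k : Nat) (i : Int), ch.length - i.toNat = k → 0 ≤ i →
      digitLoopA ch i = (ch.drop i.toNat).any
        (fun c => parfaitA ((PySem.Int.ofChars? [c]).getD 0)) := by
  intro k
  induction k with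
  | zero =>
    intro i hk hi
    have hlen : ch.length ≤ i.toNat := by omega
    rw [digitLoopA, dif_neg (by omega), List.drop_eq_nil_of_le hlen]
    rfl
  | succ k ih =>
    intro i hk hi
    have hlt : i.toNat < ch.length := by omega
    rw [digitLoopA, dif_pos (by omega),
        List.drop_eq_getElem_cons hlt, List.any_cons,
        PySem.List.pyGet?_of_nonneg _ hi, List.getElem?_eq_getElem hlt]
    simp only [Option.getD_some]
    by_cases hp : parfaitA ((PySem.Int.ofChars? [ch[i.toNat]]).getD 0)
    · simp [hp]
    · simp only [hp, Bool.not_false, if_pos, Bool.false_or]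
      rw [ih (i + 1) (by omega) (by omega), show (i + 1).toNat = i.toNat + 1 by omega]

-- ===== VERDICT (by name: the statement is the Claim_ definition above) =====
theorem Sparfait_spec : Claim_equal_Sparfait := by
  intro X _
  unfold Spec_Sparfait Sparfait Sparfait_alt
  by_cases hp : perfectB X
  · have hA : parfaitA X = true := by rw [parfaitA_eq]; exact hp
    simp only [hA, hp]
    rw [digitLoopA_eq_any (PySem.Int.toChars X) ((PySem.Int.toChars X).length - 0) 0 rfl le_rfl]
    simp [parfaitA_eq]
  · have hA : parfaitA X = false := by rw [parfaitA_eq]; simpa using hp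
    simp [hA, hp]
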